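-- pv_equiv track=rewrite | github.com/USYDDonghaoLi/Programming_Competition | Leetcode/Weekly_Contest/461/B.py | maxBalancedShipments
-- ===== SOURCE A (Python) =====
-- from typing import List
--
-- fmax = lambda x, y: x if x > y else y
--
-- def maxBalancedShipments(A: List[int]) -> int:
--     n = len(A)
--
--     B = []
--     res = [0 for _ in range(n + 1)]
--
--     for i, a in enumerate(A, 1):
--         res[i] = res[i - 1]
--         while B and A[B[-1] - 1] <= a:
--             B.pop()
--         if not B:
--             pass
--         else:
--             last = B[-1]
--             res[i] = fmax(res[last - 1] + 1, res[i])
--         B.append(i)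
--
--     return max(res)
-- ===== SOURCE B (Python) =====
-- from typing import List
--
-- def maxBalancedShipments(A: List[int]) -> int:
--     count = 0
--     cur = None  # max of the currently open segment, or None if no segment is open
--     for a in A:
--         if cur is None:
--             cur = a
--         elif a < cur:
--             count += 1
--             cur = None
--         else:
--             cur = max(cur, a)
--     return count
-- ===== Notes on version B (the rewrite author's own statement) =====
-- stated objective: simpler
-- what changed: Replaced the monotonic-stack DP over a res table (with a final max over the table) by a single greedy pass keeping only the running maximum of the open segment and a counter, cutting whenever a strictly smaller element arrives.
import Mathlib
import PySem

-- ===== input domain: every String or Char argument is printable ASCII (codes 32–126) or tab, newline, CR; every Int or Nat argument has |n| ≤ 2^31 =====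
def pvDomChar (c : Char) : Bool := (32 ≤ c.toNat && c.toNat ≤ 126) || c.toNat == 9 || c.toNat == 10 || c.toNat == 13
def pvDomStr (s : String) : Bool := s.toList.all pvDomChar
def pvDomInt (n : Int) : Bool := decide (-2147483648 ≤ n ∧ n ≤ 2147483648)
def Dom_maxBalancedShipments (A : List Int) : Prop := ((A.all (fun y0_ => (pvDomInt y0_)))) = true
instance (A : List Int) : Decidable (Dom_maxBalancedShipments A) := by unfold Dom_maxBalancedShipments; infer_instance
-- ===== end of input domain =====

-- B replaces the monotonic-stack DP with a one-pass greedy (running max + counter); same value, simpler.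


-- ===== PORT A =====
-- fmax = lambda x, y: x if x > y else y
def fmax (x y : Int) : Int := if x > y then x else y

-- Loop state: (B, res).  Python's stack B holds indices i and reads A[i-1] and res[i-1];
-- the port's stack holds exactly those two values (A[i-1], res[i-1]) for each stacked index
-- (same data, read the same way).  res is the growing list res[0..i], built in Python order.
def stepA (s : List (Int × Int) × List Int) (a : Int) : List (Int × Int) × List Int :=
  -- res[i] = res[i - 1]
  let r := s.2.getLastD 0
  -- while B and A[B[-1] - 1] <= a: B.pop()
  let B2 := s.1.dropWhile (fun p => decide (p.1 ≤ a))
  -- if not B: pass  else: res[i] = fmax(res[last - 1] + 1, res[i])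
  let ri := match B2 with
    | [] => r
    | (_, rl) :: _ => fmax (rl + 1) r
  -- B.append(i)
  ((a, r) :: B2, s.2 ++ [ri])

def maxBalancedShipments (A : List Int) : Int :=
  -- B = []; res = [0 for _ in range(n + 1)]  (entry i is written at step i; res starts as [0])
  let s := A.foldl stepA ([], [0])
  -- return max(res)
  match PySem.List.max? s.2 (fun x => x) with
  | some m => m
  | none => 0

-- ===== PORT B =====
-- Loop state: (count, cur); cur = none ↦ Python's cur is None.
def stepB (s : Int × Option Int) (a : Int) : Int × Option Int :=
  match s.2 with
  | none => (s.1, some a)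
  | some m => if a < m then (s.1 + 1, none) else (s.1, some (max m a))

def maxBalancedShipments_alt (A : List Int) : Int :=
  (A.foldl stepB (0, none)).1

-- ===== PRECONDITION & SPEC =====
def Spec_maxBalancedShipments (A : List Int) (out : Int) : Prop := out = maxBalancedShipments_alt A
instance (A : List Int) (out : Int) : Decidable (Spec_maxBalancedShipments A out) := by unfold Spec_maxBalancedShipments; infer_instance

-- ===== CLAIM (what is proved, stated in full; the proofs are below) =====
def Claim_equal_maxBalancedShipments : Prop := ∀ (A : List Int), Dom_maxBalancedShipments A → Spec_maxBalancedShipments A (maxBalancedShipments A)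

-- ===== LEMMAS AND PROOFS =====

-- res[i] as computed by one iteration of A's loop (proof-side abbreviation of stepA's match)
def riA (s : List (Int × Int) × List Int) (a : Int) : Int :=
  match s.1.dropWhile (fun p => decide (p.1 ≤ a)) with
  | [] => s.2.getLastD 0
  | (_, rl) :: _ => fmax (rl + 1) (s.2.getLastD 0)

theorem stepA_eq (s : List (Int × Int) × List Int) (a : Int) :
    stepA s a = ((a, s.2.getLastD 0) :: s.1.dropWhile (fun p => decide (p.1 ≤ a)),
                 s.2 ++ [riA s a]) := rfl

theorem riA_of_lt (s : List (Int × Int) × List Int) (a c : Int)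
    (hr : s.2.getLastD 0 = c)
    (h : ∀ p ∈ s.1.dropWhile (fun p => decide (p.1 ≤ a)), p.2 < c) :
    riA s a = c := by
  unfold riA
  cases hB2 : s.1.dropWhile (fun p => decide (p.1 ≤ a)) with
  | nil => exact hr
  | cons hd tl =>
    obtain ⟨v, rl⟩ := hd
    have : rl < c := h (v, rl) (by rw [hB2]; exact List.mem_cons_self)
    simp only [fmax, hr]
    rw [if_neg (by omega)]

-- The coupling invariant between A's state (stack, res) and B's state (count, cur):
-- res is nonempty, ends in count, is bounded by count; if no segment is open every stacked
-- dp-value is < count; if one is open with running max m, the stack top is (m, count) and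
-- everything below has dp-value < count.
def InvAB (g : Int × Option Int) (s : List (Int × Int) × List Int) : Prop :=
  s.2.getLast? = some g.1 ∧ (∀ x ∈ s.2, x ≤ g.1) ∧
  (match g.2 with
   | none => ∀ p ∈ s.1, p.2 < g.1
   | some m => ∃ back, s.1 = (m, g.1) :: back ∧ ∀ p ∈ back, p.2 < g.1)

theorem inv_step (g : Int × Option Int) (s : List (Int × Int) × List Int) (a : Int)
    (h : InvAB g s) : InvAB (stepB g a) (stepA s a) := by
  obtain ⟨hlast, hbd, hstk⟩ := h
  have hr : s.2.getLastD 0 = g.1 := by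
    rw [List.getLastD_eq_getLast?, hlast]; rfl
  have hlast' : ∀ r : Int, (s.2 ++ [r]).getLast? = some r := fun r => by
    simp [List.getLast?_append]
  cases hg : g.2 with
  | none =>
    -- B: opens a segment, count unchanged; A: res[i] stays count
    rw [hg] at hstk
    have h2 : ∀ p ∈ s.1.dropWhile (fun p => decide (p.1 ≤ a)), p.2 < g.1 :=
      fun p hp => hstk p ((List.dropWhile_sublist _).mem hp)
    have hri : riA s a = g.1 := riA_of_lt s a g.1 hr h2
    have hsB : stepB g a = (g.1, some a) := by simp [stepB, hg]
    rw [stepA_eq, hsB]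
    refine ⟨?_, ?_, ?_⟩
    · show (s.2 ++ [riA s a]).getLast? = some g.1
      rw [hri]; exact hlast' g.1
    · intro x hx
      rcases List.mem_append.mp hx with hx | hx
      · exact hbd x hx
      · simp only [List.mem_singleton] at hx
        rw [hx, hri]
    · exact ⟨_, by rw [hr], h2⟩
  | some m =>
    rw [hg] at hstk
    obtain ⟨back, hB, hback⟩ := hstk
    by_cases hlt : a < m
    · -- B: cut, count+1, segment closed; A: stack head (m,count) survives, res[i] = count+1
      have hdrop : s.1.dropWhile (fun p => decide (p.1 ≤ a)) = (m, g.1) :: back := by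
        rw [hB, List.dropWhile_cons]
        simp only [decide_eq_true_eq]
        rw [if_neg (by omega)]
      have hri : riA s a = g.1 + 1 := by
        unfold riA
        rw [hdrop]
        simp only [fmax, hr]
        rw [if_pos (by omega)]
      have hsB : stepB g a = (g.1 + 1, none) := by simp [stepB, hg, if_pos hlt]
      rw [stepA_eq, hsB]
      refine ⟨?_, ?_, ?_⟩
      · show (s.2 ++ [riA s a]).getLast? = some (g.1 + 1)
        rw [hri]; exact hlast' _
      · intro x hx
        rcases List.mem_append.mp hx with hx | hx
        · have := hbd x hx
          show x ≤ g.1 + 1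
          omega
        · simp only [List.mem_singleton] at hx
          rw [hx, hri]
      · intro p hp
        show p.2 < g.1 + 1
        rcases List.mem_cons.mp hp with hp | hp
        · rw [hp, hr]; omega
        · rw [hdrop] at hp
          rcases List.mem_cons.mp hp with hp | hp
          · rw [hp]; omega
          · have := hback p hp; omega
    · -- B: extends the segment, cur := max m a = a; A: head popped, res[i] stays count
      have hdrop : s.1.dropWhile (fun p => decide (p.1 ≤ a)) =
          back.dropWhile (fun p => decide (p.1 ≤ a)) := by
        rw [hB, List.dropWhile_cons]
        simp only [decide_eq_true_eq]
        rw [if_pos (by omega)]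
      have h2 : ∀ p ∈ s.1.dropWhile (fun p => decide (p.1 ≤ a)), p.2 < g.1 := by
        rw [hdrop]
        exact fun p hp => hback p ((List.dropWhile_sublist _).mem hp)
      have hri : riA s a = g.1 := riA_of_lt s a g.1 hr h2
      have hsB : stepB g a = (g.1, some (max m a)) := by simp [stepB, hg, if_neg hlt]
      have hmax : max m a = a := by omega
      rw [stepA_eq, hsB]
      refine ⟨?_, ?_, ?_⟩
      · show (s.2 ++ [riA s a]).getLast? = some g.1
        rw [hri]; exact hlast' _
      · intro x hx
        rcases List.mem_append.mp hx with hx | hx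
        · exact hbd x hx
        · simp only [List.mem_singleton] at hx
          rw [hx, hri]
      · exact ⟨_, by rw [hr, hmax], h2⟩

theorem inv_foldl (A : List Int) (g : Int × Option Int) (s : List (Int × Int) × List Int)
    (h : InvAB g s) : InvAB (A.foldl stepB g) (A.foldl stepA s) := by
  induction A generalizing g s with
  | nil => exact h
  | cons a t ih => exact ih _ _ (inv_step g s a h)

-- ===== VERDICT (by name: the statement is the Claim_ definition above) =====
theorem maxBalancedShipments_spec : Claim_equal_maxBalancedShipments := by
  intro A _
  unfold Spec_maxBalancedShipments maxBalancedShipments maxBalancedShipments_alt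
  have h0 : InvAB (0, none) (([], [0]) : List (Int × Int) × List Int) := by
    refine ⟨rfl, ?_, ?_⟩ <;> simp
  have h := inv_foldl A (0, none) ([], [0]) h0
  obtain ⟨hlast, hbd, -⟩ := h
  set g := A.foldl stepB (0, none) with hgdef
  set s := A.foldl stepA ([], [0]) with hsdef
  have hmem : g.1 ∈ s.2 := List.mem_of_getLast? hlast
  show (match PySem.List.max? s.2 (fun x => x) with | some m => m | none => 0) = g.1
  cases hmax : PySem.List.max? s.2 (fun x => x) with
  | none =>
    rw [PySem.List.max?_eq_none_iff] at hmax
    rw [hmax] at hmem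
    simp at hmem
  | some m =>
    have h1 : m ∈ s.2 := PySem.List.max?_mem hmax
    have h2 : g.1 ≤ m := PySem.List.max?_isMax hmax g.1 hmem
    have h3 : m ≤ g.1 := hbd m h1
    show m = g.1
    omega
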